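-- pv_equiv track=rewrite | github.com/AnkrisBlade/ForwardFootball | src/leer_ExtendedInfo.py | name_intervals_events_ima
-- ===== SOURCE A (Python) =====
-- def name_intervals_events_ima(sps_names):
--     """
--     Reads the names of the spreadsheets, there are three types: Intervals, Events, IMA Events
--     :param sps_names: names of the spreadsheets
--     :return: dictionary where keys: (Intervals, Events or IMA), values: name of the spreadsheet
--      because in there is the id of the player analyzed.
--     """
--     dic_info = {}
--     intervals = []
--     events = []
--     ima = []
--     for name in sps_names:
--         if 'Intervals' in name:
--             intervals.append(name)
--             dic_info['Intervals'] = intervals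
--         elif 'IMA' in name:
--             ima.append(name)
--             dic_info['IMA'] = ima
--         elif 'Events' in name:
--             events.append(name)
--             dic_info['Events'] = events
--         else:
--             pass
--     return dic_info
-- ===== SOURCE B (Python) =====
-- def name_intervals_events_ima(sps_names):
--     """Two-pass rewrite: first determine the key order (first occurrence of each
--     group), then build each group's list by filtering the input per key."""
--     def group(name):
--         for sub in ('Intervals', 'IMA', 'Events'):
--             if sub in name:
--                 return sub
--         return None
--
--     keys = []
--     for name in sps_names:
--         g = group(name)
--         if g is not None and g not in keys:
--             keys.append(g)
--     return {k: [n for n in sps_names if group(n) == k] for k in keys}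
-- ===== Notes on version B (the rewrite author's own statement) =====
-- stated objective: alternative
-- what changed: A builds three accumulator lists and re-inserts them into the dict inside one loop; B first computes the key order (first occurrence of each group), then constructs the dict by filtering the whole input once per key.
import Mathlib
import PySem

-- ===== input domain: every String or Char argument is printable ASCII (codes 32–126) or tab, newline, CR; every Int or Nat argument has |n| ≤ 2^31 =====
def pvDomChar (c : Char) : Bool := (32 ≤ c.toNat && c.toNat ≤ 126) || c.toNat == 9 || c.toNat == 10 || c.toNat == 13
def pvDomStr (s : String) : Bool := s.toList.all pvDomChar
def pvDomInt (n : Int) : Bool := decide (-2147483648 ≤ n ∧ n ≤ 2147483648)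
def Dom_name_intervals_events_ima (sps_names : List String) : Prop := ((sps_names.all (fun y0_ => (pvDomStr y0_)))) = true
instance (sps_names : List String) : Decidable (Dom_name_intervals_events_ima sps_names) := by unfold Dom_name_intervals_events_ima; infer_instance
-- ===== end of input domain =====

-- B is an alternative decomposition (key order first, then one filter per key); it is not claimed faster.

-- ===== PORT A =====
def name_intervals_events_ima (sps_names : List String) : List (String × List String) :=
  (sps_names.foldl
    (fun (st : PySem.Dict String (List String) × List String × List String × List String) name =>
      let dic := st.1
      let intervals := st.2.1
      let events := st.2.2.1
      let ima := st.2.2.2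
      if PySem.Str.isIn "Intervals" name then
        (dic.insert "Intervals" (intervals ++ [name]), intervals ++ [name], events, ima)
      else if PySem.Str.isIn "IMA" name then
        (dic.insert "IMA" (ima ++ [name]), intervals, events, ima ++ [name])
      else if PySem.Str.isIn "Events" name then
        (dic.insert "Events" (events ++ [name]), intervals, events ++ [name], ima)
      else st)
    (PySem.Dict.empty, [], [], [])).1.items

-- ===== PORT B =====
-- B's helper: first substring of the ordered tuple found in the name (None if no match)
def pvFirstGroup : List String → String → Option String
  | [], _ => none
  | sub :: rest, name => if PySem.Str.isIn sub name then some sub else pvFirstGroup rest name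

def pvGroup (name : String) : Option String :=
  pvFirstGroup ["Intervals", "IMA", "Events"] name

def name_intervals_events_ima_alt (sps_names : List String) : List (String × List String) :=
  let keys := sps_names.foldl
    (fun ks name =>
      match pvGroup name with
      | some g => if g ∈ ks then ks else ks ++ [g]
      | none => ks) ([] : List String)
  keys.map (fun k => (k, sps_names.filter (fun n => pvGroup n == some k)))

-- ===== PRECONDITION & SPEC =====
def Spec_name_intervals_events_ima (sps_names : List String) (out : List (String × List String)) : Prop := out = name_intervals_events_ima_alt sps_names
instance (sps_names : List String) (out : List (String × List String)) : Decidable (Spec_name_intervals_events_ima sps_names out) := by unfold Spec_name_intervals_events_ima; infer_instance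

-- ===== CLAIM (what is proved, stated in full; the proofs are below) =====
def Claim_equal_name_intervals_events_ima : Prop := ∀ (sps_names : List String), Dom_name_intervals_events_ima sps_names → Spec_name_intervals_events_ima sps_names (name_intervals_events_ima sps_names)

-- ===== LEMMAS AND PROOFS =====

-- abbreviations for the two fold step functions
def pvStepA (st : PySem.Dict String (List String) × List String × List String × List String)
    (name : String) : PySem.Dict String (List String) × List String × List String × List String :=
  if PySem.Str.isIn "Intervals" name then
    (st.1.insert "Intervals" (st.2.1 ++ [name]), st.2.1 ++ [name], st.2.2.1, st.2.2.2)
  else if PySem.Str.isIn "IMA" name then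
    (st.1.insert "IMA" (st.2.2.2 ++ [name]), st.2.1, st.2.2.1, st.2.2.2 ++ [name])
  else if PySem.Str.isIn "Events" name then
    (st.1.insert "Events" (st.2.2.1 ++ [name]), st.2.1, st.2.2.1 ++ [name], st.2.2.2)
  else st

def pvStepK (ks : List String) (name : String) : List String :=
  match pvGroup name with
  | some g => if g ∈ ks then ks else ks ++ [g]
  | none => ks

lemma pvA_eq_foldl (sps_names : List String) :
    name_intervals_events_ima sps_names =
      (sps_names.foldl pvStepA (PySem.Dict.empty, [], [], [])).1.items := rfl

lemma pvB_eq_foldl (sps_names : List String) :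
    name_intervals_events_ima_alt sps_names =
      (sps_names.foldl pvStepK []).map
        (fun k => (k, sps_names.filter (fun n => pvGroup n == some k))) := rfl

lemma pvFilter_append (p : List String) (name : String) (q : String → Bool) :
    (p ++ [name]).filter q = p.filter q ++ if q name then [name] else [] := by
  cases h : q name <;> simp [List.filter_append, List.filter, h]

lemma pvGroup_I (name : String) (h1 : PySem.Str.isIn "Intervals" name = true) :
    pvGroup name = some "Intervals" := by
  simp [pvGroup, pvFirstGroup, PySem.Str.isIn] at h1 ⊢; simp [h1]

lemma pvGroup_M (name : String) (h1 : ¬ PySem.Str.isIn "Intervals" name = true)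
    (h2 : PySem.Str.isIn "IMA" name = true) : pvGroup name = some "IMA" := by
  simp [pvGroup, pvFirstGroup, PySem.Str.isIn] at h1 h2 ⊢; simp [h1, h2]

lemma pvGroup_E (name : String) (h1 : ¬ PySem.Str.isIn "Intervals" name = true)
    (h2 : ¬ PySem.Str.isIn "IMA" name = true) (h3 : PySem.Str.isIn "Events" name = true) :
    pvGroup name = some "Events" := by
  simp [pvGroup, pvFirstGroup, PySem.Str.isIn] at h1 h2 h3 ⊢; simp [h1, h2, h3]

lemma pvGroup_N (name : String) (h1 : ¬ PySem.Str.isIn "Intervals" name = true)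
    (h2 : ¬ PySem.Str.isIn "IMA" name = true) (h3 : ¬ PySem.Str.isIn "Events" name = true) :
    pvGroup name = none := by
  simp [pvGroup, pvFirstGroup, PySem.Str.isIn] at h1 h2 h3 ⊢; simp [h1, h2, h3]

lemma pvStepA_I (d : PySem.Dict String (List String)) (I E M : List String) (name : String)
    (h1 : PySem.Str.isIn "Intervals" name = true) :
    pvStepA (d, I, E, M) name = (d.insert "Intervals" (I ++ [name]), I ++ [name], E, M) := by
  simp [PySem.Str.isIn] at h1; simp [pvStepA, PySem.Str.isIn, h1]

lemma pvStepA_M (d : PySem.Dict String (List String)) (I E M : List String) (name : String)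
    (h1 : ¬ PySem.Str.isIn "Intervals" name = true) (h2 : PySem.Str.isIn "IMA" name = true) :
    pvStepA (d, I, E, M) name = (d.insert "IMA" (M ++ [name]), I, E, M ++ [name]) := by
  simp [PySem.Str.isIn] at h1 h2; simp [pvStepA, PySem.Str.isIn, h1, h2]

lemma pvStepA_E (d : PySem.Dict String (List String)) (I E M : List String) (name : String)
    (h1 : ¬ PySem.Str.isIn "Intervals" name = true) (h2 : ¬ PySem.Str.isIn "IMA" name = true)
    (h3 : PySem.Str.isIn "Events" name = true) :
    pvStepA (d, I, E, M) name = (d.insert "Events" (E ++ [name]), I, E ++ [name], M) := by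
  simp [PySem.Str.isIn] at h1 h2 h3; simp [pvStepA, PySem.Str.isIn, h1, h2, h3]

lemma pvStepA_N (d : PySem.Dict String (List String)) (I E M : List String) (name : String)
    (h1 : ¬ PySem.Str.isIn "Intervals" name = true) (h2 : ¬ PySem.Str.isIn "IMA" name = true)
    (h3 : ¬ PySem.Str.isIn "Events" name = true) :
    pvStepA (d, I, E, M) name = (d, I, E, M) := by
  simp [PySem.Str.isIn] at h1 h2 h3; simp [pvStepA, PySem.Str.isIn, h1, h2, h3]

-- the loop invariant: after processing prefix p with key-order list ks,
-- A's dict items are ks.map (k ↦ (k, names of p in group k)) and the three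
-- accumulators are the per-group filters of p.
lemma pvInvariant (xs : List String) :
    ∀ (p : List String) (d : PySem.Dict String (List String)) (I E M : List String)
      (ks : List String),
      ks = p.foldl pvStepK [] →
      d.items = ks.map (fun k => (k, p.filter (fun n => pvGroup n == some k))) →
      I = p.filter (fun n => pvGroup n == some "Intervals") →
      E = p.filter (fun n => pvGroup n == some "Events") →
      M = p.filter (fun n => pvGroup n == some "IMA") →
      (xs.foldl pvStepA (d, I, E, M)).1.items =
        ((p ++ xs).foldl pvStepK []).map
          (fun k => (k, (p ++ xs).filter (fun n => pvGroup n == some k))) := by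
  induction xs with
  | nil =>
    intro p d I E M ks hks hd hI hE hM
    simp [hd, hks]
  | cons name xs ih =>
    intro p d I E M ks hks hd hI hE hM
    have hkeys : d.keys = ks := by
      have h : d.keys = List.map (fun k => k) ks := by
        simp only [PySem.Dict.keys, hd, List.map_map]; rfl
      simpa using h
    have hcontains : ∀ k : String, d.contains k = true ↔ k ∈ ks := by
      intro k
      rw [PySem.Dict.contains_iff_mem_keys, hkeys]
    have hfoldlK : (p ++ name :: xs).foldl pvStepK [] =
        ((p ++ [name]) ++ xs).foldl pvStepK [] := by
      simp
    have hfoldlA : ((name :: xs).foldl pvStepA (d, I, E, M)) =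
        xs.foldl pvStepA (pvStepA (d, I, E, M) name) := by rfl
    have hksStep : (p ++ [name]).foldl pvStepK [] = pvStepK ks name := by
      rw [List.foldl_append, ← hks]; rfl
    rw [hfoldlA, show p ++ name :: xs = (p ++ [name]) ++ xs by simp]
    -- case analysis on the group of `name`
    by_cases h1 : PySem.Str.isIn "Intervals" name = true
    · have hg : pvGroup name = some "Intervals" := pvGroup_I name h1
      have hstep : pvStepA (d, I, E, M) name =
          (d.insert "Intervals" (I ++ [name]), I ++ [name], E, M) := pvStepA_I d I E M name h1
      rw [hstep]
      by_cases hmem : ("Intervals" : String) ∈ ks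
      · -- existing key: insert overwrites in place, key list unchanged
        apply ih (p ++ [name]) _ _ _ _ (pvStepK ks name) (by rw [hksStep])
        · have hc : d.contains "Intervals" = true := (hcontains _).2 hmem
          rw [PySem.Dict.items_insert_of_contains _ _ hc, hd]
          have hkk : pvStepK ks name = ks := by simp [pvStepK, hg, hmem]
          rw [hkk, List.map_map]
          apply List.map_congr_left
          intro k hk
          by_cases hkI : k = "Intervals"
          · subst hkI
            simp [pvFilter_append, hg, hI]
          · simp only [Function.comp]
            rw [if_neg (by simp [hkI])]
            simp [pvFilter_append, hg, Ne.symm hkI, hkI]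
        · simp [pvFilter_append, hg, hI]
        · simp [pvFilter_append, hg, hE]
        · simp [pvFilter_append, hg, hM]
      · -- new key: appended at the end
        apply ih (p ++ [name]) _ _ _ _ (pvStepK ks name) (by rw [hksStep])
        · have hc : d.contains "Intervals" = false := by
            cases hcb : d.contains "Intervals" with
            | false => rfl
            | true => exact absurd ((hcontains _).1 hcb) hmem
          rw [PySem.Dict.items_insert_of_not_contains _ _ hc, hd]
          have hkk : pvStepK ks name = ks ++ ["Intervals"] := by
            simp [pvStepK, hg, hmem]
          rw [hkk, List.map_append]
          congr 1
          · apply List.map_congr_left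
            intro k hk
            have hkI : k ≠ "Intervals" := fun h => hmem (h ▸ hk)
            simp [pvFilter_append, hg, hkI, Ne.symm hkI]
          · simp [pvFilter_append, hg, hI]
        · simp [pvFilter_append, hg, hI]
        · simp [pvFilter_append, hg, hE]
        · simp [pvFilter_append, hg, hM]
    · by_cases h2 : PySem.Str.isIn "IMA" name = true
      · have hg : pvGroup name = some "IMA" := pvGroup_M name h1 h2
        have hstep : pvStepA (d, I, E, M) name =
            (d.insert "IMA" (M ++ [name]), I, E, M ++ [name]) := pvStepA_M d I E M name h1 h2
        rw [hstep]
        by_cases hmem : ("IMA" : String) ∈ ks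
        · apply ih (p ++ [name]) _ _ _ _ (pvStepK ks name) (by rw [hksStep])
          · have hc : d.contains "IMA" = true := (hcontains _).2 hmem
            rw [PySem.Dict.items_insert_of_contains _ _ hc, hd]
            have hkk : pvStepK ks name = ks := by simp [pvStepK, hg, hmem]
            rw [hkk, List.map_map]
            apply List.map_congr_left
            intro k hk
            by_cases hkI : k = "IMA"
            · subst hkI; simp [pvFilter_append, hg, hM]
            · simp only [Function.comp]
              rw [if_neg (by simp [hkI])]
              simp [pvFilter_append, hg, hkI, Ne.symm hkI]
          · simp [pvFilter_append, hg, hI]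
          · simp [pvFilter_append, hg, hE]
          · simp [pvFilter_append, hg, hM]
        · apply ih (p ++ [name]) _ _ _ _ (pvStepK ks name) (by rw [hksStep])
          · have hc : d.contains "IMA" = false := by
              cases hcb : d.contains "IMA" with
              | false => rfl
              | true => exact absurd ((hcontains _).1 hcb) hmem
            rw [PySem.Dict.items_insert_of_not_contains _ _ hc, hd]
            have hkk : pvStepK ks name = ks ++ ["IMA"] := by
              simp [pvStepK, hg, hmem]
            rw [hkk, List.map_append]
            congr 1
            · apply List.map_congr_left
              intro k hk
              have hkI : k ≠ "IMA" := fun h => hmem (h ▸ hk)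
              simp [pvFilter_append, hg, hkI, Ne.symm hkI]
            · simp [pvFilter_append, hg, hM]
          · simp [pvFilter_append, hg, hI]
          · simp [pvFilter_append, hg, hE]
          · simp [pvFilter_append, hg, hM]
      · by_cases h3 : PySem.Str.isIn "Events" name = true
        · have hg : pvGroup name = some "Events" := pvGroup_E name h1 h2 h3
          have hstep : pvStepA (d, I, E, M) name =
              (d.insert "Events" (E ++ [name]), I, E ++ [name], M) := pvStepA_E d I E M name h1 h2 h3
          rw [hstep]
          by_cases hmem : ("Events" : String) ∈ ks
          · apply ih (p ++ [name]) _ _ _ _ (pvStepK ks name) (by rw [hksStep])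
            · have hc : d.contains "Events" = true := (hcontains _).2 hmem
              rw [PySem.Dict.items_insert_of_contains _ _ hc, hd]
              have hkk : pvStepK ks name = ks := by simp [pvStepK, hg, hmem]
              rw [hkk, List.map_map]
              apply List.map_congr_left
              intro k hk
              by_cases hkI : k = "Events"
              · subst hkI; simp [pvFilter_append, hg, hE]
              · simp only [Function.comp]
                rw [if_neg (by simp [hkI])]
                simp [pvFilter_append, hg, hkI, Ne.symm hkI]
            · simp [pvFilter_append, hg, hI]
            · simp [pvFilter_append, hg, hE]
            · simp [pvFilter_append, hg, hM]
          · apply ih (p ++ [name]) _ _ _ _ (pvStepK ks name) (by rw [hksStep])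
            · have hc : d.contains "Events" = false := by
                cases hcb : d.contains "Events" with
                | false => rfl
                | true => exact absurd ((hcontains _).1 hcb) hmem
              rw [PySem.Dict.items_insert_of_not_contains _ _ hc, hd]
              have hkk : pvStepK ks name = ks ++ ["Events"] := by
                simp [pvStepK, hg, hmem]
              rw [hkk, List.map_append]
              congr 1
              · apply List.map_congr_left
                intro k hk
                have hkI : k ≠ "Events" := fun h => hmem (h ▸ hk)
                simp [pvFilter_append, hg, hkI, Ne.symm hkI]
              · simp [pvFilter_append, hg, hE]
            · simp [pvFilter_append, hg, hI]
            · simp [pvFilter_append, hg, hE]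
            · simp [pvFilter_append, hg, hM]
        · -- no group: nothing changes
          have hg : pvGroup name = none := pvGroup_N name h1 h2 h3
          have hstep : pvStepA (d, I, E, M) name = (d, I, E, M) := pvStepA_N d I E M name h1 h2 h3
          rw [hstep]
          apply ih (p ++ [name]) _ _ _ _ (pvStepK ks name) (by rw [hksStep])
          · have hkk : pvStepK ks name = ks := by simp [pvStepK, hg]
            rw [hkk, hd]
            apply List.map_congr_left
            intro k hk
            simp [pvFilter_append, hg]
          · simp [pvFilter_append, hg, hI]
          · simp [pvFilter_append, hg, hE]
          · simp [pvFilter_append, hg, hM]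

-- ===== VERDICT (by name: the statement is the Claim_ definition above) =====
theorem name_intervals_events_ima_spec : Claim_equal_name_intervals_events_ima := by
  intro sps_names _
  show name_intervals_events_ima sps_names = name_intervals_events_ima_alt sps_names
  rw [pvA_eq_foldl, pvB_eq_foldl]
  have := pvInvariant sps_names [] PySem.Dict.empty [] [] [] [] rfl (by rfl) rfl rfl rfl
  simpa using this
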